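-- pv_equiv track=rewrite | github.com/khanovico/round-ai-slack-bot | app/slack/bot.py | create_ascii_table
-- ===== SOURCE A (Python) =====
-- def create_ascii_table(data):
--     """Create an ASCII table from data"""
--     if not data or len(data) == 0:
--         return "No data provided"
--
--     # Extract headers from the first object's keys
--     headers = list(data[0].keys())
--
--     # Calculate the maximum width for each column
--     column_widths = []
--     for header in headers:
--         max_width = len(header)
--         for row in data:
--             max_width = max(max_width, len(str(row[header])))
--         column_widths.append(max_width)
--
--     # Create the divider
--     divider = "+" + "+".join("-" * (width + 2) for width in column_widths) + "+"
--
--     # Create the header row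
--     header_row = "|" + "|".join(f" {header.ljust(column_widths[i])} " for i, header in enumerate(headers)) + "|"
--
--     # Generate each row of data
--     rows = []
--     for row in data:
--         row_str = "|" + "|".join(f" {str(row[header]).ljust(column_widths[i])} " for i, header in enumerate(headers)) + "|"
--         rows.append(row_str)
--
--     # Assemble the full table
--     return "\n".join([divider, header_row, divider] + rows + [divider])
-- ===== SOURCE B (Python) =====
-- def create_ascii_table(data):
--     """Create an ASCII table from data"""
--     if not data:
--         return "No data provided"
--
--     headers = list(data[0].keys())
--
--     # Render each column independently as a vertical strip:
--     # padded header, padded cells, then the dash segment for the divider.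
--     cols = []
--     for h in headers:
--         col = [h] + [str(row[h]) for row in data]
--         w = max(len(x) for x in col)
--         cols.append([" " + x.ljust(w) + " " for x in col] + ["-" * (w + 2)])
--
--     # Stitch the rendered column strips together horizontally by index.
--     n = len(data)
--     lines = ["|" + "|".join(c[i] for c in cols) + "|" for i in range(n + 1)]
--     divider = "+" + "+".join(c[n + 1] for c in cols) + "+"
--     return "\n".join([divider, lines[0], divider] + lines[1:] + [divider])
-- ===== Notes on version B (the rewrite author's own statement) =====
-- stated objective: alternative
-- what changed: B renders each column as an independent vertical strip (padded header, padded cells and its dash segment, sized by one max over the strip) and then stitches the strips together horizontally by row index, instead of A's row-major assembly driven by a separately computed widths array.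
-- outside the precondition, e.g. on create_ascii_table([{'a': '1'}, {}]): A raises KeyError, B raises KeyError
import Mathlib
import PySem

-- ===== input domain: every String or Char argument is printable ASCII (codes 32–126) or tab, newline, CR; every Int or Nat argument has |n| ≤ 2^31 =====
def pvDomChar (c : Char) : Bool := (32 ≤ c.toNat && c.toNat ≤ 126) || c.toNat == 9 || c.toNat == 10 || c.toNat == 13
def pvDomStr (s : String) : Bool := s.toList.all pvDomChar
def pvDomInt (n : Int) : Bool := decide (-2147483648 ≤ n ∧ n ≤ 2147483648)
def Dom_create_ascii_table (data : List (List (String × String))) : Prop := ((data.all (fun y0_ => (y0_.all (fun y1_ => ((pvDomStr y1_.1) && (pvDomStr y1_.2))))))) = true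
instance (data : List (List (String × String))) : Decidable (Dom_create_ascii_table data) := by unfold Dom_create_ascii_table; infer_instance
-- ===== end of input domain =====

-- B renders each column as an independent vertical strip (padded header, padded cells, dash
-- segment) and stitches the strips together horizontally by index, instead of A's row-major
-- assembly with a widths array; objective: alternative decomposition, same cost.

-- s.ljust(w): pad on the right with spaces to width w ('' when w ≤ len(s)); exact (code points)
def pyLjust (s : String) (w : Int) : String :=
  s ++ String.ofList (List.replicate (w - PySem.Str.len s).toNat ' ')

-- ===== PORT A =====
def create_ascii_table (data : List (List (String × String))) : String :=
  match data with
  | [] => "No data provided"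
  | first :: _ =>
    let headers := (PySem.Dict.mk first).keys
    let column_widths := headers.foldl (fun acc h =>
        acc ++ [data.foldl (fun m row => max m (PySem.Str.len (PySem.Dict.getD (PySem.Dict.mk row) h ""))) (PySem.Str.len h)]) []
    let divider := "+" ++ PySem.Str.join "+" (column_widths.map (fun w => String.ofList (List.replicate (w + 2).toNat '-'))) ++ "+"
    let header_row := "|" ++ PySem.Str.join "|"
        ((PySem.List.enumerate headers).map (fun ih => " " ++ pyLjust ih.2 (PySem.List.pyGetD column_widths ih.1 0) ++ " ")) ++ "|"
    let rows := data.foldl (fun acc row =>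
        acc ++ ["|" ++ PySem.Str.join "|"
          ((PySem.List.enumerate headers).map (fun ih =>
            " " ++ pyLjust (PySem.Dict.getD (PySem.Dict.mk row) ih.2 "") (PySem.List.pyGetD column_widths ih.1 0) ++ " ")) ++ "|"]) []
    PySem.Str.join "\n" ([divider, header_row, divider] ++ rows ++ [divider])

-- ===== PORT B =====
-- one column strip of Source B's loop body: padded header, padded cells, dash segment
def renderCol (data : List (List (String × String))) (h : String) : List String :=
  let col := h :: data.map (fun row => PySem.Dict.getD (PySem.Dict.mk row) h "")
  let w := (PySem.List.max? (col.map PySem.Str.len) (fun y => y)).getD 0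
  col.map (fun x => " " ++ pyLjust x w ++ " ") ++ [String.ofList (List.replicate (w + 2).toNat '-')]

def create_ascii_table_alt (data : List (List (String × String))) : String :=
  match data with
  | [] => "No data provided"
  | first :: _ =>
    let headers := (PySem.Dict.mk first).keys
    let cols := headers.map (renderCol data)
    let n : Int := data.length
    let lines := (PySem.List.pyRange 0 (n + 1) 1).map (fun i =>
      "|" ++ PySem.Str.join "|" (cols.map (fun c => PySem.List.pyGetD c i "")) ++ "|")
    let divider := "+" ++ PySem.Str.join "+" (cols.map (fun c => PySem.List.pyGetD c (n + 1) "")) ++ "+"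
    PySem.Str.join "\n" ([divider, PySem.List.pyGetD lines 0 "", divider] ++ PySem.List.slice lines (some 1) none ++ [divider])

-- ===== PRECONDITION & SPEC =====
-- Pre_ excludes rows missing a key of the first row (both A and B raise KeyError there) and rows with
-- duplicate keys, on which the association-list image of a Python dict is ambiguous (a Python dict cannot hold them).
def Pre_create_ascii_table (data : List (List (String × String))) : Prop :=
  ∀ row ∈ data, (row.map Prod.fst).Nodup ∧ ∀ h ∈ (data.headD []).map Prod.fst, h ∈ row.map Prod.fst
instance (data : List (List (String × String))) : Decidable (Pre_create_ascii_table data) := by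
  unfold Pre_create_ascii_table; infer_instance

def pvWitness_create_ascii_table : (List (List (String × String))) :=
  [[("id", "1"), ("name", "bob")], [("id", "22"), ("name", "")]]

def Spec_create_ascii_table (data : List (List (String × String))) (out : String) : Prop := out = create_ascii_table_alt data
instance (data : List (List (String × String))) (out : String) : Decidable (Spec_create_ascii_table data out) := by unfold Spec_create_ascii_table; infer_instance

-- ===== CLAIM (what is proved, stated in full; the proofs are below) =====
def Claim_equal_create_ascii_table : Prop := ∀ (data : List (List (String × String))), Dom_create_ascii_table data → Pre_create_ascii_table data → Spec_create_ascii_table data (create_ascii_table data)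

-- ===== LEMMAS AND PROOFS =====

-- A's per-column running-max width
def Wcol (dat : List (List (String × String))) (h : String) : Int :=
  dat.foldl (fun m row => max m (PySem.Str.len (PySem.Dict.getD (PySem.Dict.mk row) h ""))) (PySem.Str.len h)

-- renderCol unfolded: head cell, padded data cells, dash segment, all at width Wcol
theorem renderCol_eq (dat : List (List (String × String))) (h : String) :
    renderCol dat h
      = (" " ++ pyLjust h (Wcol dat h) ++ " ")
        :: (dat.map (fun row => " " ++ pyLjust (PySem.Dict.getD (PySem.Dict.mk row) h "") (Wcol dat h) ++ " ")
            ++ [String.ofList (List.replicate (Wcol dat h + 2).toNat '-')]) := by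
  unfold renderCol
  simp only [List.map_cons, PySem.List.max?_id_cons, Option.getD_some, List.foldl_map, Wcol,
    List.map_map, Function.comp]
  rfl

-- A's enumerate-and-index line as a plain map over headers
theorem enum_line (hs : List String) (Wf : String → Int) (val : String → String) :
    (PySem.List.enumerate hs).map (fun ih => " " ++ pyLjust (val ih.2) (PySem.List.pyGetD (hs.map Wf) ih.1 0) ++ " ")
      = hs.map (fun h => " " ++ pyLjust (val h) (Wf h) ++ " ") := by
  apply List.ext_getElem
  · simp [PySem.List.length_enumerate]
  · intro k hk1 hk2
    have hkh : k < hs.length := by simpa [PySem.List.length_enumerate] using hk1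
    simp [PySem.List.getElem_enumerate, PySem.List.pyGetD_natCast,
      List.getD_eq_getElem?_getD, List.getElem?_map, List.getElem?_eq_getElem hkh]

theorem create_ascii_table_eq (data : List (List (String × String))) :
    create_ascii_table data = create_ascii_table_alt data := by
  cases data with
  | nil => rfl
  | cons first rest =>
    unfold create_ascii_table create_ascii_table_alt
    simp only
    set dat := first :: rest with hdat
    set headers := (PySem.Dict.mk first).keys with hh
    have hA : headers.foldl (fun acc h =>
        acc ++ [dat.foldl (fun m row => max m (PySem.Str.len (PySem.Dict.getD (PySem.Dict.mk row) h ""))) (PySem.Str.len h)]) []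
        = headers.map (Wcol dat) := by
      simpa [Wcol] using PySem.List.foldl_append_singleton_eq_map (Wcol dat) headers []
    rw [hA]
    -- A's rows loop as a map
    rw [PySem.List.foldl_append_singleton_eq_map
      (fun row => "|" ++ PySem.Str.join "|"
        ((PySem.List.enumerate headers).map (fun ih =>
          " " ++ pyLjust (PySem.Dict.getD (PySem.Dict.mk row) ih.2 "") (PySem.List.pyGetD (headers.map (Wcol dat)) ih.1 0) ++ " ")) ++ "|") dat []]
    -- B's lines list
    have hlines : (PySem.List.pyRange 0 ((dat.length : Int) + 1) 1).map (fun i =>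
          "|" ++ PySem.Str.join "|" ((headers.map (renderCol dat)).map (fun c => PySem.List.pyGetD c i "")) ++ "|")
        = ("|" ++ PySem.Str.join "|" (headers.map (fun h => " " ++ pyLjust h (Wcol dat h) ++ " ")) ++ "|")
          :: dat.map (fun row => "|" ++ PySem.Str.join "|"
              (headers.map (fun h => " " ++ pyLjust (PySem.Dict.getD (PySem.Dict.mk row) h "") (Wcol dat h) ++ " ")) ++ "|") := by
      have hhead : "|" ++ PySem.Str.join "|" ((headers.map (renderCol dat)).map (fun c => PySem.List.pyGetD c (0 : Int) "")) ++ "|"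
          = "|" ++ PySem.Str.join "|" (headers.map (fun h => " " ++ pyLjust h (Wcol dat h) ++ " ")) ++ "|" := by
        rw [List.map_map]
        have hm : List.map ((fun c => PySem.List.pyGetD c (0 : Int) "") ∘ renderCol dat) headers
            = headers.map (fun h => " " ++ pyLjust h (Wcol dat h) ++ " ") :=
          List.map_congr_left (fun h _ => by
            simp [Function.comp, renderCol_eq, PySem.List.pyGetD_zero_cons])
        rw [hm]
      have htail : (PySem.List.pyRange 1 ((dat.length : Int) + 1) 1).map (fun i =>
            "|" ++ PySem.Str.join "|" ((headers.map (renderCol dat)).map (fun c => PySem.List.pyGetD c i "")) ++ "|")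
          = dat.map (fun row => "|" ++ PySem.Str.join "|"
              (headers.map (fun h => " " ++ pyLjust (PySem.Dict.getD (PySem.Dict.mk row) h "") (Wcol dat h) ++ " ")) ++ "|") := by
        rw [PySem.List.pyRange_one, List.map_map,
          show ((dat.length : Int) + 1 - 1).toNat = dat.length from by omega]
        apply List.ext_getElem
        · simp
        · intro k hk1 hk2
          have hkn : k < dat.length := by simpa using hk1
          have hcell : ∀ h : String,
              PySem.List.pyGetD (renderCol dat h) (1 + (k : Int)) ""
                = " " ++ pyLjust (PySem.Dict.getD (PySem.Dict.mk (dat[k]'hkn)) h "") (Wcol dat h) ++ " " := by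
            intro h
            rw [renderCol_eq]
            have h1 : (1 + (k : Int)) = ((k + 1 : Nat) : Int) := by push_cast; ring
            rw [h1, PySem.List.pyGetD_natCast, List.getD_cons_succ, List.getD_eq_getElem?_getD,
              List.getElem?_append_left (by simpa using hkn), List.getElem?_map,
              List.getElem?_eq_getElem hkn]
            rfl
          simp only [List.getElem_map, List.getElem_range, Function.comp, List.map_map]
          have hm : List.map ((fun c => PySem.List.pyGetD c (1 + (k : Int)) "") ∘ renderCol dat) headers
              = headers.map (fun h => " " ++ pyLjust (PySem.Dict.getD (PySem.Dict.mk (dat[k]'hkn)) h "") (Wcol dat h) ++ " ") :=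
            List.map_congr_left (fun h _ => by simpa [Function.comp] using hcell h)
          rw [hm]
      rw [PySem.List.pyRange_one_cons (by positivity), List.map_cons]
      simp only [zero_add]
      rw [hhead, htail]
    rw [hlines]
    -- assemble: dividers, header line, data lines
    have hdiv : (headers.map (renderCol dat)).map (fun c => PySem.List.pyGetD c ((dat.length : Int) + 1) "")
        = (headers.map (Wcol dat)).map (fun w => String.ofList (List.replicate (w + 2).toNat '-')) := by
      simp only [List.map_map]
      apply List.map_congr_left
      intro h _
      simp only [Function.comp]
      rw [renderCol_eq]
      have hlen : ((" " ++ pyLjust h (Wcol dat h) ++ " ")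
          :: dat.map (fun row => " " ++ pyLjust (PySem.Dict.getD (PySem.Dict.mk row) h "") (Wcol dat h) ++ " ")).length
          = dat.length + 1 := by simp
      have hidx : ((dat.length : Int) + 1) = ((dat.length + 1 : Nat) : Int) := by push_cast; ring
      rw [show (" " ++ pyLjust h (Wcol dat h) ++ " ")
            :: (dat.map (fun row => " " ++ pyLjust (PySem.Dict.getD (PySem.Dict.mk row) h "") (Wcol dat h) ++ " ")
                ++ [String.ofList (List.replicate (Wcol dat h + 2).toNat '-')])
          = ((" " ++ pyLjust h (Wcol dat h) ++ " ")
              :: dat.map (fun row => " " ++ pyLjust (PySem.Dict.getD (PySem.Dict.mk row) h "") (Wcol dat h) ++ " "))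
            ++ [String.ofList (List.replicate (Wcol dat h + 2).toNat '-')] from by simp]
      rw [hidx, PySem.List.pyGetD_natCast]
      simp [List.getD_eq_getElem?_getD]
    rw [hdiv]
    have hhdr : (PySem.List.enumerate headers).map (fun ih =>
          " " ++ pyLjust ih.2 (PySem.List.pyGetD (headers.map (Wcol dat)) ih.1 0) ++ " ")
        = headers.map (fun h => " " ++ pyLjust h (Wcol dat h) ++ " ") := by
      simpa using enum_line headers (Wcol dat) id
    have hrows : ∀ row : List (String × String),
        (PySem.List.enumerate headers).map (fun ih =>
          " " ++ pyLjust (PySem.Dict.getD (PySem.Dict.mk row) ih.2 "") (PySem.List.pyGetD (headers.map (Wcol dat)) ih.1 0) ++ " ")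
        = headers.map (fun h => " " ++ pyLjust (PySem.Dict.getD (PySem.Dict.mk row) h "") (Wcol dat h) ++ " ") := by
      intro row
      exact enum_line headers (Wcol dat) (fun h => PySem.Dict.getD (PySem.Dict.mk row) h "")
    simp only [hhdr, hrows, PySem.List.pyGetD_zero_cons, PySem.List.slice_from_one, List.tail_cons,
      List.nil_append]

-- ===== VERDICT (by name: the statement is the Claim_ definition above) =====
theorem create_ascii_table_spec : Claim_equal_create_ascii_table := by
  intro data _ _
  unfold Spec_create_ascii_table
  exact create_ascii_table_eq data
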